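-- pv_equiv track=rewrite | github.com/DeanHe/Practice | LeetCodePython/MaximumStrictlyIncreasingCellsInaMatrix.py | maxIncreasingCells
-- ===== SOURCE A (Python) =====
-- from collections import defaultdict
-- from typing import List
--
-- def maxIncreasingCells(mat: List[List[int]]) -> int:
--     rows, cols = len(mat), len(mat[0])
--     order = defaultdict(list)
--     for r in range(rows):
--         for c in range(cols):
--             order[mat[r][c]].append((r, c))
--     # dp[r][c] means maximum steps to reach cell (r, c)
--     dp = [[0] * cols for _ in range(rows)]
--     # res[i] means maximum steps recorded in row or col i
--     res = [0] * (rows + cols)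
--     for n in sorted(order):
--         for r, c in order[n]:
--             dp[r][c] = max(res[r], res[rows + c]) + 1
--         for r, c in order[n]:
--             res[r] = max(res[r], dp[r][c])
--             res[rows + c] = max(res[rows + c], dp[r][c])
--     return max(res)
-- ===== SOURCE B (Python) =====
-- def maxIncreasingCells(mat):
--     rows, cols = len(mat), len(mat[0])
--     dp = [[0] * cols for _ in range(rows)]
--     values = sorted({mat[r][c] for r in range(rows) for c in range(cols)})
--     for v in values:
--         for r in range(rows):
--             for c in range(cols):
--                 if mat[r][c] == v:
--                     m = 0
--                     for j in range(cols):
--                         if mat[r][j] < v and dp[r][j] > m: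
--                             m = dp[r][j]
--                     for i in range(rows):
--                         if mat[i][c] < v and dp[i][c] > m:
--                             m = dp[i][c]
--                     dp[r][c] = m + 1
--     return max((dp[r][c] for r in range(rows) for c in range(cols)), default=0)
-- ===== Notes on version B (the rewrite author's own statement) =====
-- stated objective: simpler
-- what changed: B drops A's value->cells index dict and the running row/column maxima array res: it iterates the distinct values in increasing order and, for each cell of that value, recomputes the best predecessor by scanning the cell's row and column directly with a strict '<' comparison, finally taking the maximum over the dp table.
import Mathlib
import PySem

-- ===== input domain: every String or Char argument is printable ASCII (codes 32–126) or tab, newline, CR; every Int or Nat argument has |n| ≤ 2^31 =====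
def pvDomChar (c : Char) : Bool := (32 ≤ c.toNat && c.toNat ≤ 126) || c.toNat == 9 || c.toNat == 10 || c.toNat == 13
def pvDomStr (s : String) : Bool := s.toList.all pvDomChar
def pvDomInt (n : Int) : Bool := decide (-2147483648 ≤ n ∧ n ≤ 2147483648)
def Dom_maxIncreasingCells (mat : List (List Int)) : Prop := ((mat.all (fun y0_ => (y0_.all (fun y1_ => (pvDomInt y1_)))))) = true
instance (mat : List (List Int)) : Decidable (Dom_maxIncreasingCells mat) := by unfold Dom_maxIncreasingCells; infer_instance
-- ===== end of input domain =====

-- B drops A's value->cells index and running row/column maxima: it walks the distinct values in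
-- increasing order and rescans each cell's row and column with a strict '<' test (objective: simpler).

-- mat[r][c]; inside Pre_ the indices used by both ports are always in range, so the defaults never fire
def pvGet2 (mat : List (List Int)) (r c : Nat) : Int := (mat.getD r []).getD c 0

-- ===== PORT A =====
def maxIncreasingCells (mat : List (List Int)) : Int :=
  let rows := mat.length
  let cols := (mat.headD []).length
  let order : PySem.Dict Int (List (Nat × Nat)) :=
    (List.range rows).foldl (fun d r =>
      (List.range cols).foldl (fun d c =>
        d.modify (pvGet2 mat r c) [] (fun l => l ++ [(r, c)])) d) PySem.Dict.empty
  let dp0 : List (List Int) := (List.range rows).map (fun _ => List.replicate cols 0)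
  let res0 : List Int := List.replicate (rows + cols) 0
  let st := (PySem.List.sorted order.keys (fun x => x) false).foldl
    (fun (st : List (List Int) × List Int) n =>
      let dp1 := (order.getD n []).foldl (fun dp rc =>
        dp.set rc.1 ((dp.getD rc.1 []).set rc.2
          (max (st.2.getD rc.1 0) (st.2.getD (rows + rc.2) 0) + 1))) st.1
      let res1 := (order.getD n []).foldl (fun res rc =>
        let res' := res.set rc.1 (max (res.getD rc.1 0) ((dp1.getD rc.1 []).getD rc.2 0))
        res'.set (rows + rc.2) (max (res'.getD (rows + rc.2) 0) ((dp1.getD rc.1 []).getD rc.2 0))) st.2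
      (dp1, res1))
    (dp0, res0)
  (PySem.List.max? st.2 (fun x => x)).getD 0

-- ===== PORT B =====
def maxIncreasingCells_alt (mat : List (List Int)) : Int :=
  let rows := mat.length
  let cols := (mat.headD []).length
  let dp0 : List (List Int) := (List.range rows).map (fun _ => List.replicate cols 0)
  let values := PySem.List.sorted
    (PySem.Set.ofList ((List.range rows).flatMap (fun r => (List.range cols).map (fun c => pvGet2 mat r c))))
    (fun x => x) false
  let dp := values.foldl (fun dp v =>
    (List.range rows).foldl (fun dp r =>
      (List.range cols).foldl (fun dp c =>
        if pvGet2 mat r c == v then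
          let m1 := (List.range cols).foldl (fun m j =>
            if pvGet2 mat r j < v ∧ m < (dp.getD r []).getD j 0 then (dp.getD r []).getD j 0 else m) 0
          let m2 := (List.range rows).foldl (fun m i =>
            if pvGet2 mat i c < v ∧ m < (dp.getD i []).getD c 0 then (dp.getD i []).getD c 0 else m) m1
          dp.set r ((dp.getD r []).set c (m2 + 1))
        else dp) dp) dp) dp0
  (PySem.List.max? ((List.range rows).flatMap (fun r =>
      (List.range cols).map (fun c => (dp.getD r []).getD c 0))) (fun x => x)).getD 0

-- ===== PRECONDITION & SPEC =====
-- Pre_ excludes exactly the inputs where the Python A raises: mat == [] (IndexError on mat[0])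
-- and matrices with a row shorter than the first row (IndexError on mat[r][c]).
def Pre_maxIncreasingCells (mat : List (List Int)) : Prop :=
  mat ≠ [] ∧ ∀ row ∈ mat, (mat.headD []).length ≤ row.length
instance (mat : List (List Int)) : Decidable (Pre_maxIncreasingCells mat) := by
  unfold Pre_maxIncreasingCells; infer_instance
def pvWitness_maxIncreasingCells : List (List Int) := [[1, 2], [3, 1]]

def Spec_maxIncreasingCells (mat : List (List Int)) (out : Int) : Prop := out = maxIncreasingCells_alt mat
instance (mat : List (List Int)) (out : Int) : Decidable (Spec_maxIncreasingCells mat out) := by unfold Spec_maxIncreasingCells; infer_instance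

-- ===== CLAIM (what is proved, stated in full; the proofs are below) =====
def Claim_equal_maxIncreasingCells : Prop := ∀ (mat : List (List Int)), Dom_maxIncreasingCells mat → Pre_maxIncreasingCells mat → Spec_maxIncreasingCells mat (maxIncreasingCells mat)

-- ===== LEMMAS AND PROOFS =====

-- Generic machinery: both ports, after flattening their loops, act on an abstract
-- value function f (r,c) ↦ mat[r][c] with dimensions rows, cols.

def pvEnt (dp : List (List Int)) (r c : Nat) : Int := (dp.getD r []).getD c 0
def pvSetE (dp : List (List Int)) (r c : Nat) (x : Int) : List (List Int) :=
  dp.set r ((dp.getD r []).set c x)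
def pvCells (rows cols : Nat) : List (Nat × Nat) :=
  (List.range rows).flatMap (fun r => (List.range cols).map (fun c => (r, c)))
def pvGrp (f : Nat → Nat → Int) (rows cols : Nat) (v : Int) : List (Nat × Nat) :=
  (pvCells rows cols).filter (fun rc => f rc.1 rc.2 == v)
def pvRowMax (cols : Nat) (dp : List (List Int)) (r : Nat) : Int :=
  (List.range cols).foldl (fun a j => max a (pvEnt dp r j)) 0
def pvColMax (rows : Nat) (dp : List (List Int)) (c : Nat) : Int :=
  (List.range rows).foldl (fun a i => max a (pvEnt dp i c)) 0
def pvScan (f : Nat → Nat → Int) (rows cols : Nat) (dp : List (List Int)) (r c : Nat) (v : Int) : Int :=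
  (List.range rows).foldl (fun m i => if f i c < v ∧ m < pvEnt dp i c then pvEnt dp i c else m)
    ((List.range cols).foldl (fun m j => if f r j < v ∧ m < pvEnt dp r j then pvEnt dp r j else m) 0)
def pvStepA (f : Nat → Nat → Int) (rows cols : Nat)
    (st : List (List Int) × List Int) (n : Int) : List (List Int) × List Int :=
  let dp1 := (pvGrp f rows cols n).foldl (fun dp rc =>
    pvSetE dp rc.1 rc.2 (max (st.2.getD rc.1 0) (st.2.getD (rows + rc.2) 0) + 1)) st.1
  let res1 := (pvGrp f rows cols n).foldl (fun res rc =>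
    let res' := res.set rc.1 (max (res.getD rc.1 0) (pvEnt dp1 rc.1 rc.2))
    res'.set (rows + rc.2) (max (res'.getD (rows + rc.2) 0) (pvEnt dp1 rc.1 rc.2))) st.2
  (dp1, res1)
def pvStepB (f : Nat → Nat → Int) (rows cols : Nat) (dp : List (List Int)) (v : Int) : List (List Int) :=
  (pvGrp f rows cols v).foldl (fun dp rc =>
    pvSetE dp rc.1 rc.2 (pvScan f rows cols dp rc.1 rc.2 v + 1)) dp
def pvDP0 (rows cols : Nat) : List (List Int) :=
  (List.range rows).map (fun _ => List.replicate cols 0)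
def pvVals (f : Nat → Nat → Int) (rows cols : Nat) : List Int :=
  PySem.List.sorted (PySem.Set.ofList ((pvCells rows cols).map (fun rc => f rc.1 rc.2))) (fun x => x) false

def pvShape (rows cols : Nat) (dp : List (List Int)) : Prop :=
  dp.length = rows ∧ ∀ r < rows, (dp.getD r []).length = cols

def pvInv (f : Nat → Nat → Int) (rows cols : Nat)
    (dp : List (List Int)) (res : List Int) (P : List Int) : Prop :=
  pvShape rows cols dp ∧ res.length = rows + cols ∧
  (∀ r c, r < rows → c < cols → 0 ≤ pvEnt dp r c ∧ (f r c ∉ P → pvEnt dp r c = 0)) ∧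
  (∀ r < rows, res.getD r 0 = pvRowMax cols dp r) ∧
  (∀ c < cols, res.getD (rows + c) 0 = pvColMax rows dp c)

-- membership in the flattened cell list
theorem mem_pvCells (rows cols : Nat) (rc : Nat × Nat) :
    rc ∈ pvCells rows cols ↔ rc.1 < rows ∧ rc.2 < cols := by
  cases rc with
  | mk r c => simp [pvCells, List.mem_flatMap]

theorem mem_pvGrp (f : Nat → Nat → Int) (rows cols : Nat) (v : Int) (rc : Nat × Nat) :
    rc ∈ pvGrp f rows cols v ↔ rc.1 < rows ∧ rc.2 < cols ∧ f rc.1 rc.2 = v := by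
  simp [pvGrp, mem_pvCells, and_assoc]

-- max-fold toolkit
theorem pv_mfold_le {β : Type} (l : List β) (g : β → Int) (a b : Int)
    (ha : a ≤ b) (h : ∀ x ∈ l, g x ≤ b) :
    l.foldl (fun m x => max m (g x)) a ≤ b := by
  induction l generalizing a with
  | nil => exact ha
  | cons x t ih =>
      have hx := h x (by simp)
      exact ih (max a (g x)) (by omega) (fun y hy => h y (by simp [hy]))

theorem pv_mfold_mono {β : Type} (l : List β) (g h : β → Int) (a b : Int)
    (hab : a ≤ b) (hgh : ∀ x ∈ l, g x ≤ h x) :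
    l.foldl (fun m x => max m (g x)) a ≤ l.foldl (fun m x => max m (h x)) b := by
  induction l generalizing a b with
  | nil => exact hab
  | cons x t ih =>
      have hx := hgh x (by simp)
      exact ih (max a (g x)) (max b (h x)) (by omega) (fun y hy => hgh y (by simp [hy]))

theorem pv_mfold_max_init {β : Type} (l : List β) (g : β → Int) (a b : Int) :
    l.foldl (fun m x => max m (g x)) (max a b) = max a (l.foldl (fun m x => max m (g x)) b) := by
  induction l generalizing b with
  | nil => rfl
  | cons x t ih =>
      have : max (max a b) (g x) = max a (max b (g x)) := by omega
      rw [List.foldl_cons, this, ih, List.foldl_cons]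

theorem pv_mfold_init {β : Type} (l : List β) (g : β → Int) (a : Int) (ha : 0 ≤ a) :
    l.foldl (fun m x => max m (g x)) a = max a (l.foldl (fun m x => max m (g x)) 0) := by
  have : a = max a 0 := by omega
  rw [this, pv_mfold_max_init]
  omega

-- the scan loop shape 'if p x ∧ m < g x then g x else m' is a max-fold over the filtered list
theorem pv_condfold (l : List Nat) (g : Nat → Int) (p : Nat → Prop) [DecidablePred p] (a : Int) :
    l.foldl (fun m j => if p j ∧ m < g j then g j else m) a
      = (l.filter (fun j => decide (p j))).foldl (fun m j => max m (g j)) a := by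
  rw [← PySem.List.foldl_ite_eq_foldl_filter (p := p) (f := fun m j => max m (g j))]
  apply PySem.List.foldl_congr_mem
  intro m j _
  by_cases hp : p j
  · simp only [hp, true_and, if_pos]
    omega
  · simp [hp]

-- dropping elements whose value is ≤ 0 does not change a max-fold from a nonneg start
theorem pv_mfold_filter_eq (l : List Nat) (g : Nat → Int) (p : Nat → Prop) [DecidablePred p]
    (h : ∀ x ∈ l, ¬ p x → g x ≤ 0) (a : Int) (ha : 0 ≤ a) :
    (l.filter (fun j => decide (p j))).foldl (fun m j => max m (g j)) a
      = l.foldl (fun m j => max m (g j)) a := by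
  induction l generalizing a with
  | nil => rfl
  | cons x t ih =>
      by_cases hp : p x
      · simp only [List.filter_cons, hp, decide_true, if_pos, List.foldl_cons]
        exact ih (fun y hy => h y (by simp [hy])) (max a (g x)) (by omega)
      · have hx := h x (by simp) hp
        have : max a (g x) = a := by omega
        simp only [List.filter_cons, hp, decide_false, Bool.false_eq_true, if_false,
          List.foldl_cons, this]
        exact ih (fun y hy => h y (by simp [hy])) a ha


theorem pv_getD_set {α : Type} (l : List α) (k : Nat) (x d : α) (i : Nat) (hk : k < l.length) :
    (l.set k x).getD i d = if k = i then x else l.getD i d := by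
  simp only [List.getD_eq_getElem?_getD, List.getElem?_set, hk, if_true]
  split <;> simp

theorem pvEnt_setE_ne (dp : List (List Int)) (a b : Nat) (x : Int) (r c : Nat)
    (h : a ≠ r ∨ b ≠ c) : pvEnt (pvSetE dp a b x) r c = pvEnt dp r c := by
  by_cases hlen : a < dp.length
  · rw [pvEnt, pvSetE, pv_getD_set _ a _ [] r hlen]
    rcases h with h | h
    · rw [if_neg h, pvEnt]
    · by_cases har : a = r
      · rw [if_pos har, pvEnt, har]
        by_cases hbrow : b < (dp.getD r []).length
        · rw [pv_getD_set _ b x 0 c hbrow, if_neg h]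
        · rw [List.set_eq_of_length_le (by omega)]
      · rw [if_neg har, pvEnt]
  · rw [pvEnt, pvSetE, List.set_eq_of_length_le (by omega), pvEnt]

theorem pvEnt_setE_self (rows cols : Nat) (dp : List (List Int)) (a b : Nat) (x : Int)
    (hsh : pvShape rows cols dp) (ha : a < rows) (hb : b < cols) :
    pvEnt (pvSetE dp a b x) a b = x := by
  have hlen : a < dp.length := by rw [hsh.1]; exact ha
  have hbrow : b < (dp.getD a []).length := by rw [hsh.2 a ha]; exact hb
  rw [pvEnt, pvSetE, pv_getD_set _ a _ [] a hlen, if_pos rfl,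
    pv_getD_set _ b x 0 b hbrow, if_pos rfl]

theorem pvShape_setE (rows cols : Nat) (dp : List (List Int)) (a b : Nat) (x : Int)
    (hsh : pvShape rows cols dp) : pvShape rows cols (pvSetE dp a b x) := by
  by_cases hlen : a < dp.length
  · constructor
    · simp [pvSetE, hsh.1]
    · intro r hr
      rw [pvSetE, pv_getD_set _ a _ [] r hlen]
      by_cases har : a = r
      · rw [if_pos har, List.length_set]
        exact hsh.2 a (by omega)
      · rw [if_neg har]; exact hsh.2 r hr
  · rw [pvSetE, List.set_eq_of_length_le (by omega)]; exact hsh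

theorem pv_foldl_setE_shape (rows cols : Nat) (val : List (List Int) → Nat × Nat → Int)
    (l : List (Nat × Nat)) :
    ∀ dp, pvShape rows cols dp →
      pvShape rows cols (l.foldl (fun dp rc => pvSetE dp rc.1 rc.2 (val dp rc)) dp) := by
  induction l with
  | nil => intro dp h; exact h
  | cons rc t ih =>
      intro dp h
      exact ih _ (pvShape_setE rows cols dp rc.1 rc.2 _ h)

theorem pv_writeA_entry (rows cols : Nat) (res : List Int) (l : List (Nat × Nat))
    (hl : ∀ rc ∈ l, rc.1 < rows ∧ rc.2 < cols) :
    ∀ dp, pvShape rows cols dp → ∀ r c, r < rows → c < cols →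
      pvEnt (l.foldl (fun dp rc =>
          pvSetE dp rc.1 rc.2 (max (res.getD rc.1 0) (res.getD (rows + rc.2) 0) + 1)) dp) r c
        = if (r, c) ∈ l then max (res.getD r 0) (res.getD (rows + c) 0) + 1 else pvEnt dp r c := by
  induction l with
  | nil => intro dp _ r c _ _; simp
  | cons rc t ih =>
      intro dp hsh r c hr hc
      have ht : ∀ x ∈ t, x.1 < rows ∧ x.2 < cols := fun x hx => hl x (by simp [hx])
      rw [List.foldl_cons]
      rw [ih ht _ (pvShape_setE rows cols dp rc.1 rc.2 _ hsh) r c hr hc]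
      by_cases hmem : (r, c) ∈ t
      · simp [hmem]
      · by_cases heq : rc = (r, c)
        · subst heq
          simp only [hmem, if_false, List.mem_cons, true_or, if_true]
          exact pvEnt_setE_self rows cols dp r c _ hsh hr hc
        · have hne : rc.1 ≠ r ∨ rc.2 ≠ c := by
            by_contra hcon
            push_neg at hcon
            exact heq (Prod.ext hcon.1 hcon.2)
          have hnm : (r, c) ∉ rc :: t := by
            simp only [List.mem_cons, not_or]
            exact ⟨fun h => heq h.symm, hmem⟩
          simp only [hmem, if_false, hnm, if_false]
          exact pvEnt_setE_ne dp rc.1 rc.2 _ r c hne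

theorem pv_resfold_len (rows cols : Nat) (e : Nat × Nat → Int) (l : List (Nat × Nat)) :
    ∀ res : List Int,
      (l.foldl (fun res rc =>
          let res' := res.set rc.1 (max (res.getD rc.1 0) (e rc))
          res'.set (rows + rc.2) (max (res'.getD (rows + rc.2) 0) (e rc))) res).length
        = res.length := by
  induction l with
  | nil => intro res; rfl
  | cons rc t ih => intro res; rw [List.foldl_cons, ih]; simp

theorem pv_resfold_getD (rows cols : Nat) (e : Nat × Nat → Int) (l : List (Nat × Nat))
    (hl : ∀ rc ∈ l, rc.1 < rows ∧ rc.2 < cols) :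
    ∀ res : List Int, res.length = rows + cols → ∀ i,
      (l.foldl (fun res rc =>
          let res' := res.set rc.1 (max (res.getD rc.1 0) (e rc))
          res'.set (rows + rc.2) (max (res'.getD (rows + rc.2) 0) (e rc))) res).getD i 0
        = l.foldl (fun a rc => if rc.1 = i ∨ rows + rc.2 = i then max a (e rc) else a)
            (res.getD i 0) := by
  induction l with
  | nil => intro res _ i; rfl
  | cons rc t ih =>
      intro res hlen i
      have hrc := hl rc (by simp)
      have ht : ∀ x ∈ t, x.1 < rows ∧ x.2 < cols := fun x hx => hl x (by simp [hx])
      have h1 : rc.1 < res.length := by omega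
      have h2 : rows + rc.2 < (res.set rc.1 (max (res.getD rc.1 0) (e rc))).length := by
        simp [List.length_set]; omega
      rw [List.foldl_cons, List.foldl_cons,
        ih ht _ (by simp [List.length_set, hlen]) i]
      congr 1
      have hne : rc.1 ≠ rows + rc.2 := by omega
      rw [pv_getD_set _ _ _ _ _ h2]
      by_cases hcase : rows + rc.2 = i
      · rw [if_pos hcase, if_pos (Or.inr hcase), pv_getD_set _ _ _ _ _ h1, if_neg hne, hcase]
      · rw [if_neg hcase, pv_getD_set _ _ _ _ _ h1]
        by_cases hcase2 : rc.1 = i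
        · rw [if_pos hcase2, if_pos (Or.inl hcase2), hcase2]
        · rw [if_neg hcase2, if_neg (by simp [hcase, hcase2])]


theorem pv_rowMax_nonneg (cols : Nat) (dp : List (List Int)) (r : Nat) :
    0 ≤ pvRowMax cols dp r :=
  (PySem.List.le_foldl_max_int (List.range cols) (fun j => pvEnt dp r j) 0).1

theorem pv_colMax_nonneg (rows : Nat) (dp : List (List Int)) (c : Nat) :
    0 ≤ pvColMax rows dp c :=
  (PySem.List.le_foldl_max_int (List.range rows) (fun i => pvEnt dp i c) 0).1

theorem pv_scan_eq (f : Nat → Nat → Int) (rows cols : Nat) (dp : List (List Int))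
    (res : List Int) (P : List Int) (v : Int)
    (hInv : pvInv f rows cols dp res P) (hP : ∀ p ∈ P, p < v)
    (dpm : List (List Int))
    (hag : ∀ r c, r < rows → c < cols → f r c ≠ v → pvEnt dpm r c = pvEnt dp r c)
    (r c : Nat) (hr : r < rows) (hc : c < cols) :
    pvScan f rows cols dpm r c v = max (res.getD r 0) (res.getD (rows + c) 0) := by
  obtain ⟨hsh, hlen, hent, hrow, hcol⟩ := hInv
  have hrowpart : (List.range cols).foldl
      (fun m j => if f r j < v ∧ m < pvEnt dpm r j then pvEnt dpm r j else m) 0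
      = pvRowMax cols dp r := by
    rw [pv_condfold (List.range cols) (fun j => pvEnt dpm r j) (fun j => f r j < v) 0]
    have e1 : ((List.range cols).filter (fun j => decide (f r j < v))).foldl
        (fun m j => max m (pvEnt dpm r j)) 0
        = ((List.range cols).filter (fun j => decide (f r j < v))).foldl
            (fun m j => max m (pvEnt dp r j)) 0 := by
      apply PySem.List.foldl_congr_mem
      intro m j hj
      have hj' := List.mem_filter.mp hj
      have hjc : j < cols := List.mem_range.mp hj'.1
      have hlt : f r j < v := of_decide_eq_true hj'.2
      rw [hag r j hr hjc (by omega)]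
    have hz : ∀ j ∈ List.range cols, ¬ (f r j < v) → pvEnt dp r j ≤ 0 := by
      intro j hj hnlt
      have hjc := List.mem_range.mp hj
      have hnp : f r j ∉ P := fun hmem => hnlt (hP (f r j) hmem)
      rw [(hent r j hr hjc).2 hnp]
    rw [e1, pv_mfold_filter_eq (List.range cols) (fun j => pvEnt dp r j)
      (fun j => f r j < v) hz 0 le_rfl]
    rfl
  have hcolpart : (List.range rows).foldl
      (fun m i => if f i c < v ∧ m < pvEnt dpm i c then pvEnt dpm i c else m)
        (pvRowMax cols dp r)
      = max (pvRowMax cols dp r) (pvColMax rows dp c) := by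
    rw [pv_condfold (List.range rows) (fun i => pvEnt dpm i c) (fun i => f i c < v)
      (pvRowMax cols dp r)]
    have e1 : ((List.range rows).filter (fun i => decide (f i c < v))).foldl
        (fun m i => max m (pvEnt dpm i c)) (pvRowMax cols dp r)
        = ((List.range rows).filter (fun i => decide (f i c < v))).foldl
            (fun m i => max m (pvEnt dp i c)) (pvRowMax cols dp r) := by
      apply PySem.List.foldl_congr_mem
      intro m i hi
      have hi' := List.mem_filter.mp hi
      have hir : i < rows := List.mem_range.mp hi'.1
      have hlt : f i c < v := of_decide_eq_true hi'.2
      rw [hag i c hir hc (by omega)]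
    have hz : ∀ i ∈ List.range rows, ¬ (f i c < v) → pvEnt dp i c ≤ 0 := by
      intro i hi hnlt
      have hir := List.mem_range.mp hi
      have hnp : f i c ∉ P := fun hmem => hnlt (hP (f i c) hmem)
      rw [(hent i c hir hc).2 hnp]
    rw [e1, pv_mfold_filter_eq (List.range rows) (fun i => pvEnt dp i c)
      (fun i => f i c < v) hz (pvRowMax cols dp r) (pv_rowMax_nonneg cols dp r),
      pv_mfold_init (List.range rows) (fun i => pvEnt dp i c) (pvRowMax cols dp r)
        (pv_rowMax_nonneg cols dp r)]
    rfl
  rw [pvScan, hrowpart, hcolpart, hrow r hr, hcol c hc]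

theorem pv_writeBA (f : Nat → Nat → Int) (rows cols : Nat) (dp : List (List Int))
    (res : List Int) (P : List Int) (v : Int)
    (hInv : pvInv f rows cols dp res P) (hP : ∀ p ∈ P, p < v)
    (l : List (Nat × Nat)) (hl : ∀ rc ∈ l, rc.1 < rows ∧ rc.2 < cols ∧ f rc.1 rc.2 = v) :
    ∀ dpm, (∀ r c, r < rows → c < cols → f r c ≠ v → pvEnt dpm r c = pvEnt dp r c) →
      l.foldl (fun dp' rc => pvSetE dp' rc.1 rc.2 (pvScan f rows cols dp' rc.1 rc.2 v + 1)) dpm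
        = l.foldl (fun dp' rc =>
            pvSetE dp' rc.1 rc.2 (max (res.getD rc.1 0) (res.getD (rows + rc.2) 0) + 1)) dpm := by
  induction l with
  | nil => intro dpm _; rfl
  | cons rc t ih =>
      intro dpm hag
      obtain ⟨h1, h2, h3⟩ := hl rc (by simp)
      have ht : ∀ x ∈ t, x.1 < rows ∧ x.2 < cols ∧ f x.1 x.2 = v :=
        fun x hx => hl x (by simp [hx])
      rw [List.foldl_cons, List.foldl_cons,
        pv_scan_eq f rows cols dp res P v ⟨hInv.1, hInv.2.1, hInv.2.2.1, hInv.2.2.2.1, hInv.2.2.2.2⟩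
          hP dpm hag rc.1 rc.2 h1 h2]
      apply ih ht
      intro r c hr hc hne
      have hne2 : rc.1 ≠ r ∨ rc.2 ≠ c := by
        by_contra hcon
        push_neg at hcon
        apply hne
        rw [← hcon.1, ← hcon.2]
        exact h3
      rw [pvEnt_setE_ne _ _ _ _ _ _ hne2]
      exact hag r c hr hc hne


theorem pv_step (f : Nat → Nat → Int) (rows cols : Nat) (dp : List (List Int))
    (res : List Int) (P : List Int) (v : Int)
    (hInv : pvInv f rows cols dp res P) (hP : ∀ p ∈ P, p < v) :
    pvStepB f rows cols dp v = (pvStepA f rows cols (dp, res) v).1 ∧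
    pvInv f rows cols (pvStepA f rows cols (dp, res) v).1
      (pvStepA f rows cols (dp, res) v).2 (P ++ [v]) := by
  obtain ⟨hsh, hlen, hent, hrow, hcol⟩ := hInv
  have hgrp : ∀ rc ∈ pvGrp f rows cols v, rc.1 < rows ∧ rc.2 < cols ∧ f rc.1 rc.2 = v :=
    fun rc h => (mem_pvGrp f rows cols v rc).mp h
  have hgrp2 : ∀ rc ∈ pvGrp f rows cols v, rc.1 < rows ∧ rc.2 < cols :=
    fun rc h => ⟨(hgrp rc h).1, (hgrp rc h).2.1⟩
  have hvP : v ∉ P := fun h => absurd (hP v h) (lt_irrefl v)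
  have hresr : ∀ r, r < rows → 0 ≤ res.getD r 0 := by
    intro r hr; rw [hrow r hr]; exact pv_rowMax_nonneg cols dp r
  have hresc : ∀ c, c < cols → 0 ≤ res.getD (rows + c) 0 := by
    intro c hc; rw [hcol c hc]; exact pv_colMax_nonneg rows dp c
  -- the updated dp and res of step A
  have hA1 : (pvStepA f rows cols (dp, res) v).1
      = (pvGrp f rows cols v).foldl (fun dp' rc =>
          pvSetE dp' rc.1 rc.2 (max (res.getD rc.1 0) (res.getD (rows + rc.2) 0) + 1)) dp := rfl
  have hsh1 : pvShape rows cols (pvStepA f rows cols (dp, res) v).1 := by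
    rw [hA1]
    exact pv_foldl_setE_shape rows cols
      (fun _ rc => max (res.getD rc.1 0) (res.getD (rows + rc.2) 0) + 1)
      (pvGrp f rows cols v) dp hsh
  have hentchar : ∀ r c, r < rows → c < cols →
      pvEnt (pvStepA f rows cols (dp, res) v).1 r c
        = if (r, c) ∈ pvGrp f rows cols v
            then max (res.getD r 0) (res.getD (rows + c) 0) + 1 else pvEnt dp r c := by
    intro r c hr hc
    rw [hA1]
    exact pv_writeA_entry rows cols res (pvGrp f rows cols v) hgrp2 dp hsh r c hr hc
  refine ⟨?_, hsh1, ?_, ?_, ?_, ?_⟩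
  · -- step B equals step A's dp
    rw [pvStepB, hA1]
    exact pv_writeBA f rows cols dp res P v ⟨hsh, hlen, hent, hrow, hcol⟩ hP
      (pvGrp f rows cols v) hgrp dp (fun _ _ _ _ _ => rfl)
  · -- res length
    have hres1 : (pvStepA f rows cols (dp, res) v).2
        = (pvGrp f rows cols v).foldl (fun res' rc =>
            let res'' := res'.set rc.1 (max (res'.getD rc.1 0)
              (pvEnt (pvStepA f rows cols (dp, res) v).1 rc.1 rc.2))
            res''.set (rows + rc.2) (max (res''.getD (rows + rc.2) 0)
              (pvEnt (pvStepA f rows cols (dp, res) v).1 rc.1 rc.2)) ) res := rfl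
    rw [hres1, pv_resfold_len rows cols (fun rc => pvEnt (pvStepA f rows cols (dp, res) v).1 rc.1 rc.2)]
    exact hlen
  · -- entries: nonneg, and zero on unprocessed values
    intro r c hr hc
    rw [hentchar r c hr hc]
    by_cases hmem : (r, c) ∈ pvGrp f rows cols v
    · rw [if_pos hmem]
      constructor
      · have := hresr r hr; omega
      · intro hnot
        exfalso
        exact hnot (by
          have : f r c = v := ((mem_pvGrp f rows cols v (r, c)).mp hmem).2.2
          simp [this])
    · rw [if_neg hmem]
      refine ⟨(hent r c hr hc).1, ?_⟩
      intro hnot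
      exact (hent r c hr hc).2 (fun hmem2 => hnot (List.mem_append_left _ hmem2))
  · -- row maxima
    intro r hr
    have hres1 : (pvStepA f rows cols (dp, res) v).2
        = (pvGrp f rows cols v).foldl (fun res' rc =>
            let res'' := res'.set rc.1 (max (res'.getD rc.1 0)
              (pvEnt (pvStepA f rows cols (dp, res) v).1 rc.1 rc.2))
            res''.set (rows + rc.2) (max (res''.getD (rows + rc.2) 0)
              (pvEnt (pvStepA f rows cols (dp, res) v).1 rc.1 rc.2)) ) res := rfl
    rw [hres1, pv_resfold_getD rows cols _ (pvGrp f rows cols v) hgrp2 res hlen r]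
    have hc1 : (pvGrp f rows cols v).foldl
        (fun a rc => if rc.1 = r ∨ rows + rc.2 = r then max a
          (pvEnt (pvStepA f rows cols (dp, res) v).1 rc.1 rc.2) else a) (res.getD r 0)
        = (pvGrp f rows cols v).foldl
        (fun a rc => if rc.1 = r then max a
          (pvEnt (pvStepA f rows cols (dp, res) v).1 rc.1 rc.2) else a) (res.getD r 0) := by
      apply PySem.List.foldl_congr_mem
      intro a rc hrc
      have := (hgrp2 rc hrc).1
      by_cases h : rc.1 = r
      · simp [h]
      · rw [if_neg (by omega), if_neg h]
    rw [hc1, PySem.List.foldl_ite_eq_foldl_filter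
      (p := fun rc : Nat × Nat => rc.1 = r)
      (f := fun a rc => max a (pvEnt (pvStepA f rows cols (dp, res) v).1 rc.1 rc.2))]
    -- X = filtered fold, Y = pvRowMax of new dp
    have hXbounds := PySem.List.le_foldl_max_int
      ((pvGrp f rows cols v).filter (fun rc => decide (rc.1 = r)))
      (fun rc => pvEnt (pvStepA f rows cols (dp, res) v).1 rc.1 rc.2) (res.getD r 0)
    have hYbounds := PySem.List.le_foldl_max_int (List.range cols)
      (fun j => pvEnt (pvStepA f rows cols (dp, res) v).1 r j) 0
    have holdY := PySem.List.le_foldl_max_int (List.range cols) (fun j => pvEnt dp r j) 0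
    apply le_antisymm
    · -- X ≤ Y
      apply pv_mfold_le
      · -- init: res.getD r 0 = old rowMax ≤ new rowMax
        rw [hrow r hr]
        apply pv_mfold_mono (List.range cols) (fun j => pvEnt dp r j)
          (fun j => pvEnt (pvStepA f rows cols (dp, res) v).1 r j) 0 0 le_rfl
        intro j hj
        have hjc := List.mem_range.mp hj
        rw [hentchar r j hr hjc]
        by_cases hmem : (r, j) ∈ pvGrp f rows cols v
        · rw [if_pos hmem]
          have h0 : pvEnt dp r j = 0 := (hent r j hr hjc).2 (by
            rw [((mem_pvGrp f rows cols v (r, j)).mp hmem).2.2]; exact hvP)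
          have := hresr r hr
          omega
        · rw [if_neg hmem]
      · intro rc hrc
        have hrc' := List.mem_filter.mp hrc
        have heq : rc.1 = r := of_decide_eq_true hrc'.2
        have hc2 : rc.2 < cols := (hgrp2 rc hrc'.1).2
        have := hYbounds.2 rc.2 (List.mem_range.mpr hc2)
        rw [heq]
        exact this
    · -- Y ≤ X
      apply pv_mfold_le
      · exact le_trans (hresr r hr) hXbounds.1
      · intro j hj
        have hjc := List.mem_range.mp hj
        rw [hentchar r j hr hjc]
        by_cases hmem : (r, j) ∈ pvGrp f rows cols v
        · rw [if_pos hmem]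
          have hmf : (r, j) ∈ (pvGrp f rows cols v).filter (fun rc => decide (rc.1 = r)) :=
            List.mem_filter.mpr ⟨hmem, by simp⟩
          have := hXbounds.2 (r, j) hmf
          rw [hentchar r j hr hjc, if_pos hmem] at this
          exact this
        · rw [if_neg hmem]
          have h1 : pvEnt dp r j ≤ res.getD r 0 := by
            rw [hrow r hr]
            exact holdY.2 j (List.mem_range.mpr hjc)
          exact le_trans h1 hXbounds.1
  · -- column maxima
    intro c hc
    have hres1 : (pvStepA f rows cols (dp, res) v).2
        = (pvGrp f rows cols v).foldl (fun res' rc =>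
            let res'' := res'.set rc.1 (max (res'.getD rc.1 0)
              (pvEnt (pvStepA f rows cols (dp, res) v).1 rc.1 rc.2))
            res''.set (rows + rc.2) (max (res''.getD (rows + rc.2) 0)
              (pvEnt (pvStepA f rows cols (dp, res) v).1 rc.1 rc.2)) ) res := rfl
    rw [hres1, pv_resfold_getD rows cols _ (pvGrp f rows cols v) hgrp2 res hlen (rows + c)]
    have hc1 : (pvGrp f rows cols v).foldl
        (fun a rc => if rc.1 = rows + c ∨ rows + rc.2 = rows + c then max a
          (pvEnt (pvStepA f rows cols (dp, res) v).1 rc.1 rc.2) else a) (res.getD (rows + c) 0)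
        = (pvGrp f rows cols v).foldl
        (fun a rc => if rc.2 = c then max a
          (pvEnt (pvStepA f rows cols (dp, res) v).1 rc.1 rc.2) else a) (res.getD (rows + c) 0) := by
      apply PySem.List.foldl_congr_mem
      intro a rc hrc
      have := (hgrp2 rc hrc).1
      by_cases h : rc.2 = c
      · rw [if_pos (Or.inr (by omega)), if_pos h]
      · rw [if_neg (by omega), if_neg h]
    rw [hc1, PySem.List.foldl_ite_eq_foldl_filter
      (p := fun rc : Nat × Nat => rc.2 = c)
      (f := fun a rc => max a (pvEnt (pvStepA f rows cols (dp, res) v).1 rc.1 rc.2))]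
    have hXbounds := PySem.List.le_foldl_max_int
      ((pvGrp f rows cols v).filter (fun rc => decide (rc.2 = c)))
      (fun rc => pvEnt (pvStepA f rows cols (dp, res) v).1 rc.1 rc.2) (res.getD (rows + c) 0)
    have hYbounds := PySem.List.le_foldl_max_int (List.range rows)
      (fun i => pvEnt (pvStepA f rows cols (dp, res) v).1 i c) 0
    have holdY := PySem.List.le_foldl_max_int (List.range rows) (fun i => pvEnt dp i c) 0
    apply le_antisymm
    · apply pv_mfold_le
      · rw [hcol c hc]
        apply pv_mfold_mono (List.range rows) (fun i => pvEnt dp i c)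
          (fun i => pvEnt (pvStepA f rows cols (dp, res) v).1 i c) 0 0 le_rfl
        intro i hi
        have hir := List.mem_range.mp hi
        rw [hentchar i c hir hc]
        by_cases hmem : (i, c) ∈ pvGrp f rows cols v
        · rw [if_pos hmem]
          have h0 : pvEnt dp i c = 0 := (hent i c hir hc).2 (by
            rw [((mem_pvGrp f rows cols v (i, c)).mp hmem).2.2]; exact hvP)
          have := hresr i hir
          omega
        · rw [if_neg hmem]
      · intro rc hrc
        have hrc' := List.mem_filter.mp hrc
        have heq : rc.2 = c := of_decide_eq_true hrc'.2
        have hr2 : rc.1 < rows := (hgrp2 rc hrc'.1).1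
        have := hYbounds.2 rc.1 (List.mem_range.mpr hr2)
        rw [heq]
        exact this
    · apply pv_mfold_le
      · exact le_trans (hresc c hc) hXbounds.1
      · intro i hi
        have hir := List.mem_range.mp hi
        rw [hentchar i c hir hc]
        by_cases hmem : (i, c) ∈ pvGrp f rows cols v
        · rw [if_pos hmem]
          have hmf : (i, c) ∈ (pvGrp f rows cols v).filter (fun rc => decide (rc.2 = c)) :=
            List.mem_filter.mpr ⟨hmem, by simp⟩
          have := hXbounds.2 (i, c) hmf
          rw [hentchar i c hir hc, if_pos hmem] at this
          exact this
        · rw [if_neg hmem]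
          have h1 : pvEnt dp i c ≤ res.getD (rows + c) 0 := by
            rw [hcol c hc]
            exact holdY.2 i (List.mem_range.mpr hir)
          exact le_trans h1 hXbounds.1


theorem pv_loop (f : Nat → Nat → Int) (rows cols : Nat) (S : List Int) :
    ∀ (P : List Int) (dp : List (List Int)) (res : List Int),
      S.Pairwise (· < ·) → (∀ p ∈ P, ∀ s ∈ S, p < s) → pvInv f rows cols dp res P →
      (S.foldl (pvStepB f rows cols) dp = (S.foldl (pvStepA f rows cols) (dp, res)).1 ∧
       pvInv f rows cols (S.foldl (pvStepA f rows cols) (dp, res)).1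
         (S.foldl (pvStepA f rows cols) (dp, res)).2 (P ++ S)) := by
  induction S with
  | nil =>
      intro P dp res _ _ hInv
      simpa using hInv
  | cons v S' ih =>
      intro P dp res hS hPS hInv
      have hPv : ∀ p ∈ P, p < v := fun p hp => hPS p hp v (by simp)
      obtain ⟨hBA, hInv1⟩ := pv_step f rows cols dp res P v hInv hPv
      have hvS : ∀ s ∈ S', v < s := (List.pairwise_cons.mp hS).1
      have hS' : S'.Pairwise (· < ·) := (List.pairwise_cons.mp hS).2
      have hPS' : ∀ p ∈ P ++ [v], ∀ s ∈ S', p < s := by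
        intro p hp s hs
        rcases List.mem_append.mp hp with h | h
        · exact lt_trans (hPS p h v (by simp)) (hvS s hs)
        · rw [List.mem_singleton.mp h]; exact hvS s hs
      have hpair : ((pvStepA f rows cols (dp, res) v).1, (pvStepA f rows cols (dp, res) v).2)
          = pvStepA f rows cols (dp, res) v := rfl
      have happ : P ++ v :: S' = (P ++ [v]) ++ S' := by simp
      obtain ⟨ih1, ih2⟩ := ih (P ++ [v]) (pvStepA f rows cols (dp, res) v).1
        (pvStepA f rows cols (dp, res) v).2 hS' hPS' hInv1
      rw [hpair] at ih1 ih2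
      constructor
      · rw [List.foldl_cons, List.foldl_cons, hBA, ih1]
      · rw [List.foldl_cons, happ]
        exact ih2
theorem pv_inv_init (f : Nat → Nat → Int) (rows cols : Nat) :
    pvInv f rows cols (pvDP0 rows cols) (List.replicate (rows + cols) 0) [] := by
  have hget : ∀ r, r < rows → (pvDP0 rows cols).getD r [] = List.replicate cols 0 := by
    intro r hr
    simp [pvDP0, List.getD_eq_getElem?_getD, List.getElem?_range, hr]
  have hent0 : ∀ r c, r < rows → c < cols → pvEnt (pvDP0 rows cols) r c = 0 := by
    intro r c hr hc
    rw [pvEnt, hget r hr]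
    simp [List.getD_eq_getElem?_getD, List.getElem?_replicate, hc]
  have hrm : ∀ r, r < rows → pvRowMax cols (pvDP0 rows cols) r = 0 := by
    intro r hr
    apply le_antisymm
    · apply pv_mfold_le
      · exact le_rfl
      · intro j hj
        rw [hent0 r j hr (List.mem_range.mp hj)]
    · exact pv_rowMax_nonneg cols (pvDP0 rows cols) r
  have hcm : ∀ c, c < cols → pvColMax rows (pvDP0 rows cols) c = 0 := by
    intro c hc
    apply le_antisymm
    · apply pv_mfold_le
      · exact le_rfl
      · intro i hi
        rw [hent0 i c (List.mem_range.mp hi) hc]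
    · exact pv_colMax_nonneg rows (pvDP0 rows cols) c
  refine ⟨⟨by simp [pvDP0], ?_⟩, by simp, ?_, ?_, ?_⟩
  · intro r hr; rw [hget r hr]; simp
  · intro r c hr hc
    exact ⟨by rw [hent0 r c hr hc], fun _ => hent0 r c hr hc⟩
  · intro r hr
    rw [hrm r hr]
    have hlt : r < rows + cols := by omega
    simp [List.getD_eq_getElem?_getD, List.getElem?_replicate, hlt]
  · intro c hc
    rw [hcm c hc]
    have hlt : rows + c < rows + cols := by omega
    simp [List.getD_eq_getElem?_getD, List.getElem?_replicate, hlt]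
theorem pv_maxD0 (xs : List Int) (h : ∀ x ∈ xs, 0 ≤ x) :
    (PySem.List.max? xs (fun x => x)).getD 0 = xs.foldl max 0 := by
  cases xs with
  | nil => rfl
  | cons x t =>
      rw [PySem.List.max?_id_cons]
      have hx : 0 ≤ x := h x (by simp)
      have hmx : max 0 x = x := by omega
      rw [List.foldl_cons, hmx, Option.getD_some]
theorem pv_final (f : Nat → Nat → Int) (rows cols : Nat) (dp : List (List Int))
    (res : List Int) (P : List Int) (hInv : pvInv f rows cols dp res P) :
    (PySem.List.max? res (fun x => x)).getD 0
      = (PySem.List.max? ((pvCells rows cols).map (fun rc => pvEnt dp rc.1 rc.2))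
          (fun x => x)).getD 0 := by
  obtain ⟨hsh, hlen, hent, hrow, hcol⟩ := hInv
  have hresidx : ∀ i, i < res.length → res.getD i 0 ∈ res := by
    intro i hi
    rw [List.getD_eq_getElem?_getD, List.getElem?_eq_getElem hi]
    exact List.getElem_mem hi
  have hresval : ∀ x ∈ res, ∃ i, i < rows + cols ∧ x = res.getD i 0 := by
    intro x hx
    obtain ⟨i, hi, hxi⟩ := List.mem_iff_getElem.mp hx
    exact ⟨i, by omega, by rw [List.getD_eq_getElem?_getD, List.getElem?_eq_getElem hi]; exact hxi.symm⟩
  have hresnn : ∀ x ∈ res, 0 ≤ x := by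
    intro x hx
    obtain ⟨i, hi, hxi⟩ := hresval x hx
    subst hxi
    by_cases hir : i < rows
    · rw [hrow i hir]; exact pv_rowMax_nonneg cols dp i
    · have : i = rows + (i - rows) := by omega
      rw [this, hcol (i - rows) (by omega)]
      exact pv_colMax_nonneg rows dp (i - rows)
  have hflatnn : ∀ x ∈ (pvCells rows cols).map (fun rc => pvEnt dp rc.1 rc.2), 0 ≤ x := by
    intro x hx
    obtain ⟨rc, hrc, hval⟩ := List.mem_map.mp hx
    obtain ⟨h1, h2⟩ := (mem_pvCells rows cols rc).mp hrc
    rw [← hval]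
    exact (hent rc.1 rc.2 h1 h2).1
  rw [pv_maxD0 res hresnn, pv_maxD0 _ hflatnn]
  have hflatmem : ∀ r c, r < rows → c < cols →
      pvEnt dp r c ∈ (pvCells rows cols).map (fun rc => pvEnt dp rc.1 rc.2) :=
    fun r c hr hc => List.mem_map.mpr ⟨(r, c), (mem_pvCells rows cols (r, c)).mpr ⟨hr, hc⟩, rfl⟩
  have hYb := PySem.List.le_foldl_max ((pvCells rows cols).map (fun rc => pvEnt dp rc.1 rc.2)) 0
  have hXb := PySem.List.le_foldl_max res 0
  apply le_antisymm
  · rcases PySem.List.foldl_max_mem res 0 with h0 | hmem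
    · rw [h0]; exact hYb.1
    · obtain ⟨i, hi, hxi⟩ := hresval _ hmem
      rw [hxi]
      by_cases hir : i < rows
      · rw [hrow i hir]
        apply pv_mfold_le
        · exact hYb.1
        · intro j hj
          exact hYb.2 _ (hflatmem i j hir (List.mem_range.mp hj))
      · have hieq : i = rows + (i - rows) := by omega
        rw [hieq, hcol (i - rows) (by omega)]
        apply pv_mfold_le
        · exact hYb.1
        · intro j hj
          exact hYb.2 _ (hflatmem j (i - rows) (List.mem_range.mp hj) (by omega))
  · rcases PySem.List.foldl_max_mem ((pvCells rows cols).map (fun rc => pvEnt dp rc.1 rc.2)) 0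
      with h0 | hmem
    · rw [h0]; exact hXb.1
    · obtain ⟨rc, hrc, hval⟩ := List.mem_map.mp hmem
      obtain ⟨h1, h2⟩ := (mem_pvCells rows cols rc).mp hrc
      rw [← hval]
      have hb1 : pvEnt dp rc.1 rc.2 ≤ pvRowMax cols dp rc.1 :=
        (PySem.List.le_foldl_max_int (List.range cols) (fun j => pvEnt dp rc.1 j) 0).2
          rc.2 (List.mem_range.mpr h2)
      have hb2 : pvRowMax cols dp rc.1 ≤ res.foldl max 0 := by
        rw [← hrow rc.1 h1]
        exact hXb.2 _ (hresidx rc.1 (by omega))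
      exact le_trans hb1 hb2


theorem pv_A_eq (mat : List (List Int)) :
    maxIncreasingCells mat
      = (PySem.List.max?
          ((pvVals (pvGet2 mat) mat.length (mat.headD []).length).foldl
             (pvStepA (pvGet2 mat) mat.length (mat.headD []).length)
             (pvDP0 mat.length (mat.headD []).length,
              List.replicate (mat.length + (mat.headD []).length) 0)).2
          (fun x => x)).getD 0 := by
  have horder : (List.range mat.length).foldl (fun d r =>
      (List.range (mat.headD []).length).foldl (fun d c =>
        d.modify (pvGet2 mat r c) [] (fun l => l ++ [(r, c)])) d)
        (PySem.Dict.empty : PySem.Dict Int (List (Nat × Nat)))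
      = ((pvCells mat.length (mat.headD []).length).map
          (fun rc => (pvGet2 mat rc.1 rc.2, rc))).foldl
          (fun d p => d.modify p.1 [] (fun l => l ++ [p.2])) PySem.Dict.empty := by
    rw [List.foldl_map, pvCells, List.foldl_flatMap]
    apply PySem.List.foldl_congr_mem
    intro d r _
    rw [List.foldl_map]
  have hgetD : ∀ n : Int, (((pvCells mat.length (mat.headD []).length).map
          (fun rc => (pvGet2 mat rc.1 rc.2, rc))).foldl
          (fun d p => d.modify p.1 [] (fun l => l ++ [p.2])) PySem.Dict.empty).getD n []
      = pvGrp (pvGet2 mat) mat.length (mat.headD []).length n := by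
    intro n
    rw [PySem.Dict.getD_foldl_modify_append, PySem.Dict.getD_empty, List.nil_append,
      List.filter_map, List.map_map]
    rw [pvGrp]
    exact List.map_id _
  have hkeys : (((pvCells mat.length (mat.headD []).length).map
          (fun rc => (pvGet2 mat rc.1 rc.2, rc))).foldl
          (fun d p => d.modify p.1 [] (fun l => l ++ [p.2])) PySem.Dict.empty).keys
      = PySem.Set.ofList ((pvCells mat.length (mat.headD []).length).map
          (fun rc => pvGet2 mat rc.1 rc.2)) := by
    rw [PySem.Dict.keys_foldl_modify_key (key := Prod.fst), PySem.Dict.keys_empty,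
      List.map_map]
    rfl
  simp only [maxIncreasingCells]
  rw [horder, hkeys]
  simp only [hgetD]
  rfl


theorem pv_B_eq (mat : List (List Int)) :
    maxIncreasingCells_alt mat
      = (PySem.List.max?
          ((pvCells mat.length (mat.headD []).length).map (fun rc =>
            pvEnt ((pvVals (pvGet2 mat) mat.length (mat.headD []).length).foldl
              (pvStepB (pvGet2 mat) mat.length (mat.headD []).length)
              (pvDP0 mat.length (mat.headD []).length)) rc.1 rc.2))
          (fun x => x)).getD 0 := by
  have hvals : (List.range mat.length).flatMap (fun r =>
        (List.range (mat.headD []).length).map (fun c => pvGet2 mat r c))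
      = (pvCells mat.length (mat.headD []).length).map (fun rc => pvGet2 mat rc.1 rc.2) := by
    rw [pvCells, List.map_flatMap]
    apply List.flatMap_congr
    intro r _
    rw [List.map_map]
    rfl
  have hflat : ∀ dp : List (List Int),
      (List.range mat.length).flatMap (fun r =>
        (List.range (mat.headD []).length).map (fun c => (dp.getD r []).getD c 0))
      = (pvCells mat.length (mat.headD []).length).map (fun rc => pvEnt dp rc.1 rc.2) := by
    intro dp
    rw [pvCells, List.map_flatMap]
    apply List.flatMap_congr
    intro r _
    rw [List.map_map]
    rfl
  have hsame : (fun (dp : List (List Int)) (v : Int) =>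
      (List.range mat.length).foldl (fun dp r =>
        (List.range (mat.headD []).length).foldl (fun dp c =>
          if pvGet2 mat r c == v then
            dp.set r ((dp.getD r []).set c
              ((List.range mat.length).foldl (fun m i =>
                  if pvGet2 mat i c < v ∧ m < (dp.getD i []).getD c 0
                  then (dp.getD i []).getD c 0 else m)
                ((List.range (mat.headD []).length).foldl (fun m j =>
                  if pvGet2 mat r j < v ∧ m < (dp.getD r []).getD j 0
                  then (dp.getD r []).getD j 0 else m) 0) + 1))
          else dp) dp) dp)
      = pvStepB (pvGet2 mat) mat.length (mat.headD []).length := by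
    funext dp v
    rw [pvStepB, pvGrp, ← PySem.List.foldl_if_eq_foldl_filter
      (p := fun rc : Nat × Nat => pvGet2 mat rc.1 rc.2 == v)
      (f := fun dp (rc : Nat × Nat) =>
        pvSetE dp rc.1 rc.2 (pvScan (pvGet2 mat) mat.length (mat.headD []).length dp rc.1 rc.2 v + 1)),
      pvCells, List.foldl_flatMap]
    apply PySem.List.foldl_congr_mem
    intro d r _
    rw [List.foldl_map]
    rfl
  simp only [maxIncreasingCells_alt]
  rw [hvals, hsame, hflat]
  rfl

theorem pv_main (mat : List (List Int)) : maxIncreasingCells mat = maxIncreasingCells_alt mat := by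
  rw [pv_A_eq, pv_B_eq]
  have hnodup : (pvVals (pvGet2 mat) mat.length (mat.headD []).length).Nodup :=
    (PySem.List.sorted_perm _ _ _).nodup_iff.mpr (PySem.Set.nodup_ofList _)
  have hle : (pvVals (pvGet2 mat) mat.length (mat.headD []).length).Pairwise (· ≤ ·) :=
    PySem.List.sorted_pairwise _ _
  have hlt : (pvVals (pvGet2 mat) mat.length (mat.headD []).length).Pairwise (· < ·) :=
    (hle.and hnodup).imp (fun h => lt_of_le_of_ne h.1 h.2)
  obtain ⟨hBA, hInv⟩ := pv_loop (pvGet2 mat) mat.length (mat.headD []).length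
    (pvVals (pvGet2 mat) mat.length (mat.headD []).length) []
    (pvDP0 mat.length (mat.headD []).length)
    (List.replicate (mat.length + (mat.headD []).length) 0)
    hlt (by simp) (pv_inv_init (pvGet2 mat) mat.length (mat.headD []).length)
  rw [hBA]
  exact pv_final (pvGet2 mat) mat.length (mat.headD []).length _ _ _ hInv

-- ===== VERDICT (by name: the statement is the Claim_ definition above) =====
theorem maxIncreasingCells_spec : Claim_equal_maxIncreasingCells := by
  intro mat _ _
  unfold Spec_maxIncreasingCells
  exact pv_main mat
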